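-- pv_equiv track=rewrite | github.com/pxz000git/Spider | shouScrapyZH/shouSpiders/items.py | loadConf
-- ===== SOURCE A (Python) =====
-- def loadConf(conf, confBase, type="cover"):
--     """通用的2个字典属性覆盖的方法"""
--     baseKeys = confBase.keys()
--     loadKeys = conf.keys()
--     for key in loadKeys:
--         if type == 'cover':
--             confBase[key] = conf[key]
--         if type == "append":
--             confBase[key] = conf[key]
--         if type == "short":
--             if key in baseKeys:
--                 del confBase[key]
--     return confBase
-- ===== SOURCE B (Python) =====
-- def loadConf(conf, confBase, type="cover"):
--     """Build the result as a fresh dict (comprehension / unpacking merge) instead of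
--     mutating confBase key by key; same return value as A (A mutates confBase in place)."""
--     if type == "short":
--         return {k: v for k, v in confBase.items() if k not in conf}
--     if type in ("cover", "append"):
--         return {**confBase, **conf}
--     return confBase
-- ===== Notes on version B (the rewrite author's own statement) =====
-- stated objective: idiomatic
-- what changed: B constructs a fresh result dict functionally (a dict comprehension filtering confBase for 'short', a {**confBase, **conf} unpacking merge for 'cover'/'append') instead of A's single key loop that mutates confBase in place with per-key mode re-tests; note B does not mutate confBase (return value equivalence).
import Mathlib
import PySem

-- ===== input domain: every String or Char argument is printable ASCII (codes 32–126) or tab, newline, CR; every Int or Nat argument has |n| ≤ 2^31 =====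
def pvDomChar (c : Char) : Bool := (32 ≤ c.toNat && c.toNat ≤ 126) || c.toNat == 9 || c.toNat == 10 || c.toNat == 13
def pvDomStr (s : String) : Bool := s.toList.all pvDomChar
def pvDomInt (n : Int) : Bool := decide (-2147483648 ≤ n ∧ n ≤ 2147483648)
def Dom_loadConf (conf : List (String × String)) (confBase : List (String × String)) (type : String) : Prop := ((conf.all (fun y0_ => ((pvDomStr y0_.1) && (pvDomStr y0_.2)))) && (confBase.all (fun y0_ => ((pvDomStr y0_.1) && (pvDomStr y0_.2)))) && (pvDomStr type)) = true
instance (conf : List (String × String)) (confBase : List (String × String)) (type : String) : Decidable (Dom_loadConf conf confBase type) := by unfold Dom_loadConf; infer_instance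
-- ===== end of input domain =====

-- B builds a fresh result (filter comprehension / unpacking merge) instead of A's in-place key loop;
-- equivalence is about the RETURN value only (A mutates confBase in place, B does not).


-- ===== PORT A =====
-- one loop over conf's keys; each iteration re-tests the mode three times, exactly as A does
def loadConf (conf : List (String × String)) (confBase : List (String × String)) (type : String) : List (String × String) :=
  let c := PySem.Dict.ofList conf
  let base := PySem.Dict.ofList confBase
  (c.keys.foldl (fun d key =>
      let d1 := if type = "cover" then d.insert key (c.getD key "") else d
      let d2 := if type = "append" then d1.insert key (c.getD key "") else d1
      if type = "short" then (if d2.contains key then d2.erase key else d2) else d2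
    ) base).items

-- ===== PORT B =====
-- no mutation of base: 'short' is a filter comprehension over confBase's items,
-- 'cover'/'append' is the {**confBase, **conf} unpacking merge into a fresh dict
def loadConf_alt (conf : List (String × String)) (confBase : List (String × String)) (type : String) : List (String × String) :=
  let c := PySem.Dict.ofList conf
  let base := PySem.Dict.ofList confBase
  if type = "short" then
    base.items.filter (fun p => !(c.contains p.1))
  else if type = "cover" ∨ type = "append" then
    ((PySem.Dict.empty.update base.items).update c.items).items
  else
    base.items

-- ===== PRECONDITION & SPEC =====
def Spec_loadConf (conf : List (String × String)) (confBase : List (String × String)) (type : String) (out : List (String × String)) : Prop := out = loadConf_alt conf confBase type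
instance (conf : List (String × String)) (confBase : List (String × String)) (type : String) (out : List (String × String)) : Decidable (Spec_loadConf conf confBase type out) := by unfold Spec_loadConf; infer_instance

-- ===== CLAIM =====
def Claim_equal_loadConf : Prop := ∀ (conf : List (String × String)) (confBase : List (String × String)) (type : String), Dom_loadConf conf confBase type → Spec_loadConf conf confBase type (loadConf conf confBase type)

-- ===== LEMMAS AND PROOFS =====

-- erasing an absent key is the identity
theorem erase_of_not_contains_pv (d : PySem.Dict String String) (k : String)
    (h : d.contains k = false) : d.erase k = d := by
  apply PySem.Dict.ext
  show d.items.filter (fun p => !(p.1 == k)) = d.items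
  rw [List.filter_eq_self]
  intro p hp
  simp only [Bool.not_eq_eq_eq_not, Bool.not_true]
  by_contra hne
  have : d.items.any (fun p => p.1 == k) = true := by
    rw [List.any_eq_true]
    exact ⟨p, hp, by simpa using hne⟩
  rw [show d.items.any (fun p => p.1 == k) = d.contains k from rfl] at this
  simp [h] at this

-- a foldl of insert over a dict's keys, reading each value back, equals the foldl of insert over its items
theorem foldl_keys_insert_eq_items (c : PySem.Dict String String) :
    ∀ (l : List (String × String)) (d : PySem.Dict String String),
      (∀ p ∈ l, c.getD p.1 "" = p.2) →
      (l.map (·.1)).foldl (fun d k => d.insert k (c.getD k "")) d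
        = l.foldl (fun d p => d.insert p.1 p.2) d := by
  intro l
  induction l with
  | nil => intro d _; rfl
  | cons p rest ih =>
      intro d h
      simp only [List.map_cons, List.foldl_cons]
      rw [h p (List.mem_cons_self)]
      exact ih _ (fun q hq => h q (List.mem_cons_of_mem _ hq))

-- folding erase over a key list filters the items by non-membership in that list
theorem foldl_erase_items_pv (ks : List String) :
    ∀ (b : PySem.Dict String String),
      (ks.foldl (fun d k => d.erase k) b).items
        = b.items.filter (fun p => !(ks.contains p.1)) := by
  induction ks with
  | nil => intro b; simp
  | cons k ks ih =>
      intro b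
      simp only [List.foldl_cons]
      rw [ih (b.erase k)]
      show (b.items.filter (fun p => !(p.1 == k))).filter (fun p => !(ks.contains p.1))
          = b.items.filter (fun p => !((k :: ks).contains p.1))
      rw [List.filter_filter]
      apply List.filter_congr
      intro p _
      simp only [List.contains_cons, Bool.not_or]
      rw [Bool.and_comm, BEq.comm]

-- replaying a Nodup-keyed dict's items into the empty dict reproduces it
theorem update_empty_items_pv (b : PySem.Dict String String) (h : b.keys.Nodup) :
    PySem.Dict.empty.update b.items = b := by
  apply PySem.Dict.ext
  show (b.items.foldl (fun d p => d.insert p.1 p.2) PySem.Dict.empty).items = b.items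
  have := PySem.Dict.items_foldl_insert_fresh b.items (fun p => p.1) (fun p => p.2)
    PySem.Dict.empty (fun a _ => PySem.Dict.contains_empty a.1) h
  simpa using this

-- ===== VERDICT =====
theorem loadConf_spec : Claim_equal_loadConf := by
  intro conf confBase type _
  unfold Spec_loadConf loadConf loadConf_alt
  set c := PySem.Dict.ofList conf with hc
  set base := PySem.Dict.ofList confBase with hb
  have hval : ∀ p ∈ c.items, c.getD p.1 "" = p.2 := by
    rintro ⟨k, v⟩ hp
    exact PySem.Dict.getD_of_mem_items c hp (PySem.Dict.nodup_keys_ofList conf) ""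
  have hmerge : type = "cover" ∨ type = "append" →
      (c.keys.foldl (fun d k => d.insert k (c.getD k "")) base).items
        = ((PySem.Dict.empty.update base.items).update c.items).items := by
    intro _
    rw [update_empty_items_pv base (PySem.Dict.nodup_keys_ofList confBase)]
    congr 1
    exact foldl_keys_insert_eq_items c c.items base hval
  by_cases h1 : type = "cover"
  · subst h1
    simp only [String.reduceEq, reduceIte, true_or]
    exact hmerge (Or.inl rfl)
  · by_cases h2 : type = "append"
    · subst h2
      simp only [String.reduceEq, reduceIte, or_true]
      exact hmerge (Or.inr rfl)
    · by_cases h3 : type = "short"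
      · subst h3
        simp only [String.reduceEq, reduceIte]
        have hfun : (fun (d : PySem.Dict String String) (key : String) =>
            if d.contains key then d.erase key else d) = fun d k => d.erase k := by
          funext d k
          by_cases hk : d.contains k = true
          · simp [hk]
          · simp only [Bool.not_eq_true] at hk
            simp [hk, erase_of_not_contains_pv d k hk]
        rw [hfun, foldl_erase_items_pv c.keys base]
        apply List.filter_congr
        intro p _
        rw [PySem.Dict.contains_eq_decide_mem_keys c p.1]
        simp
      · simp only [if_neg h1, if_neg h2, if_neg h3,
          if_neg (show ¬(type = "cover" ∨ type = "append") from fun h => h.elim h1 h2)]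
        congr 1
        exact List.foldl_fixed c.keys
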